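-- pv_equiv track=rewrite | github.com/dkarthicks27/ML_Database | sample/no_of_divisors.py | no_divisors
-- ===== SOURCE A (Python) =====
-- def no_divisors(number):
--     if number == 1:
--         return 1
--     else:
--         count = 0
--         for i in range(1, number+1):
--             if number % i == 0:
--                 count += 1
--         return count
-- ===== SOURCE B (Python) =====
-- def no_divisors(number):
--     if number < 1:
--         return 0
--     count = 0
--     i = 1
--     while i * i <= number:
--         if number % i == 0:
--             count += 1 if i * i == number else 2
--         i += 1
--     return count
-- ===== Notes on version B (the rewrite author's own statement) =====
-- stated objective: faster
-- what changed: replaces the full scan of 1..n with trial division up to sqrt(n), counting each divisor pair (i, n//i) at once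
import Mathlib
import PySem

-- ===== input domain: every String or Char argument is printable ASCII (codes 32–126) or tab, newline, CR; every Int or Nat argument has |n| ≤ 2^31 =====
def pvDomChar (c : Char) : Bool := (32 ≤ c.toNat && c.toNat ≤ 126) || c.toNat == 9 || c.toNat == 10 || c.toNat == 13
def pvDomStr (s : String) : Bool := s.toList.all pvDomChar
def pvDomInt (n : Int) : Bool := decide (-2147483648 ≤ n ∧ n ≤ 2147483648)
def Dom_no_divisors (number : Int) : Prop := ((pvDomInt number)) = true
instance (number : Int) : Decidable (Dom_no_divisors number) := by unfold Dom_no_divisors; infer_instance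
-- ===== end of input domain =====

-- B counts divisors by trial division up to sqrt(number), counting divisor pairs, instead of A's full scan of 1..number (asymptotically faster).

-- ===== PORT A =====
def no_divisors (number : Int) : Int :=
  if number = 1 then 1
  else
    (PySem.List.pyRange 1 (number + 1) 1).foldl
      (fun count i => if PySem.Int.mod number i = 0 then count + 1 else count) 0

-- ===== PORT B =====
-- the while loop of Source B, carrying the accumulator `count`
def pvBLoop (number i count : Int) : Int :=
  if h : i * i ≤ number then
    pvBLoop number (i + 1)
      (if PySem.Int.mod number i = 0 then count + (if i * i = number then 1 else 2) else count)
  else count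
termination_by (number + 1 - i).toNat
decreasing_by
  have hi : i ≤ number := by nlinarith [sq_nonneg (i - 1), sq_nonneg i]
  omega

def no_divisors_alt (number : Int) : Int :=
  if number < 1 then 0
  else pvBLoop number 1 0

-- ===== PRECONDITION & SPEC =====
def Spec_no_divisors (number : Int) (out : Int) : Prop := out = no_divisors_alt number
instance (number : Int) (out : Int) : Decidable (Spec_no_divisors number out) := by unfold Spec_no_divisors; infer_instance

-- ===== CLAIM (what is proved, stated in full; the proofs are below) =====
def Claim_equal_no_divisors : Prop := ∀ (number : Int), Dom_no_divisors number → Spec_no_divisors number (no_divisors number)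

-- ===== LEMMAS AND PROOFS =====

-- the set of divisors d of n that the sqrt-loop has not yet accounted for at step i:
-- those with i ≤ d and i ≤ n/d (stated multiplicatively as i*d ≤ n)
noncomputable def pvS (n i : Int) : Int :=
  (((Finset.Icc 1 n).filter (fun d => d ∣ n ∧ i ≤ d ∧ i * d ≤ n)).card : Int)

lemma pvS_empty (n i : Int) (hi : 1 ≤ i) (h : ¬ i * i ≤ n) : pvS n i = 0 := by
  unfold pvS
  norm_num
  intro d h1 h2 hd hid
  nlinarith

-- one loop step: the not-yet-counted divisors at i are those at i+1 plus the pair {i, n/i}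
lemma pvS_step (n i : Int) (hn : 1 ≤ n) (hi : 1 ≤ i) (h : i * i ≤ n) :
    pvS n i = (if PySem.Int.mod n i = 0 then (if i * i = n then 1 else 2) else 0) + pvS n (i + 1) := by
  have hmod : (PySem.Int.mod n i = 0) ↔ i ∣ n := PySem.Int.mod_eq_zero_iff_dvd n i
  unfold pvS
  by_cases hdvd : i ∣ n
  · -- the extra elements: i itself and the cofactor q with n = i * q
    have hin : i ≤ n := le_trans (le_mul_of_one_le_left (by omega) hi) h
    obtain ⟨q, hq⟩ := hdvd
    have hq1 : 1 ≤ q := by nlinarith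
    have hiq : i ≤ q := by nlinarith
    have hqn : q ≤ n := by nlinarith
    have hqdvd : q ∣ n := ⟨i, by rw [hq, mul_comm]⟩
    have hset : (Finset.Icc 1 n).filter (fun d => d ∣ n ∧ i ≤ d ∧ i * d ≤ n)
        = insert i (insert q ((Finset.Icc 1 n).filter (fun d => d ∣ n ∧ i + 1 ≤ d ∧ (i + 1) * d ≤ n))) := by
      ext d
      simp only [Finset.mem_insert, Finset.mem_filter, Finset.mem_Icc]
      constructor
      · rintro ⟨⟨hd1, hdn⟩, hddvd, hid, hprod⟩
        by_cases hd_i : d = i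
        · exact Or.inl hd_i
        by_cases hstep : (i + 1) * d ≤ n
        · exact Or.inr (Or.inr ⟨⟨hd1, hdn⟩, hddvd, by omega, hstep⟩)
        · -- i*d ≤ n < (i+1)*d and d ∣ n force n = i*d, i.e. d = q
          refine Or.inr (Or.inl ?_)
          obtain ⟨r, hr⟩ := hddvd
          have hr1 : 1 ≤ r := by nlinarith
          have hri : r = i := by nlinarith
          nlinarith
      · rintro (he | he | ⟨⟨hd1, hdn⟩, hddvd, hid, hprod⟩)
        · rw [he]; exact ⟨⟨hi, hin⟩, ⟨q, hq⟩, le_refl i, by nlinarith⟩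
        · rw [he]; exact ⟨⟨by omega, hqn⟩, hqdvd, hiq, by nlinarith⟩
        · exact ⟨⟨hd1, hdn⟩, hddvd, by omega, by nlinarith⟩
    have hi_rest : i ∉ (Finset.Icc 1 n).filter (fun e => e ∣ n ∧ i + 1 ≤ e ∧ (i + 1) * e ≤ n) := by
      simp only [Finset.mem_filter, Finset.mem_Icc]
      rintro ⟨-, -, hle, -⟩
      omega
    have hq_rest : q ∉ (Finset.Icc 1 n).filter (fun e => e ∣ n ∧ i + 1 ≤ e ∧ (i + 1) * e ≤ n) := by
      simp only [Finset.mem_filter, Finset.mem_Icc]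
      rintro ⟨-, -, -, hprod⟩
      nlinarith
    rw [if_pos (hmod.mpr ⟨q, hq⟩)]
    by_cases hsq : i * i = n
    · have hqi : q = i := by nlinarith
      rw [hqi] at hset
      rw [hset, Finset.insert_idem, Finset.card_insert_of_notMem hi_rest,
        if_pos hsq]
      push_cast
      ring
    · have hiq' : i ≠ q := fun he => hsq (by rw [← he] at hq; exact hq.symm)
      have hi_notmem : i ∉ insert q ((Finset.Icc 1 n).filter (fun e => e ∣ n ∧ i + 1 ≤ e ∧ (i + 1) * e ≤ n)) := by
        simp only [Finset.mem_insert, not_or]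
        exact ⟨hiq', hi_rest⟩
      rw [hset, Finset.card_insert_of_notMem hi_notmem,
        Finset.card_insert_of_notMem hq_rest, if_neg hsq]
      push_cast
      ring
  · -- i does not divide n: no divisor is removed at this step
    have hset : (Finset.Icc 1 n).filter (fun d => d ∣ n ∧ i ≤ d ∧ i * d ≤ n)
        = (Finset.Icc 1 n).filter (fun d => d ∣ n ∧ i + 1 ≤ d ∧ (i + 1) * d ≤ n) := by
      ext d
      simp only [Finset.mem_filter, Finset.mem_Icc]
      constructor
      · rintro ⟨⟨hd1, hdn⟩, hddvd, hid, hprod⟩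
        have hdi : d ≠ i := by rintro rfl; exact hdvd hddvd
        refine ⟨⟨hd1, hdn⟩, hddvd, by omega, ?_⟩
        by_contra hstep
        rw [not_le] at hstep
        obtain ⟨r, hr⟩ := hddvd
        have hr1 : 1 ≤ r := by nlinarith
        have hri : r = i := by nlinarith
        exact hdvd ⟨d, by rw [hr, hri, mul_comm]⟩
      · rintro ⟨⟨hd1, hdn⟩, hddvd, hid, hprod⟩
        exact ⟨⟨hd1, hdn⟩, hddvd, by omega, by nlinarith⟩
    rw [hset, if_neg (fun hc => hdvd (hmod.mp hc))]
    ring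

-- the loop computes count + (the number of divisor pairs still ahead)
lemma pvBLoop_eq (n : Int) (hn : 1 ≤ n) : ∀ (k : Nat) (i count : Int), (n + 1 - i).toNat = k → 1 ≤ i →
    pvBLoop n i count = count + pvS n i := by
  intro k
  induction k using Nat.strong_induction_on with
  | _ k ih =>
    intro i count hk hi
    rw [pvBLoop]
    split_ifs with h hm hs
    · have hin : i ≤ n := by nlinarith
      rw [ih (n + 1 - (i + 1)).toNat (by omega) (i + 1) _ rfl (by omega),
        pvS_step n i hn hi h, if_pos hm, if_pos hs]
      ring
    · have hin : i ≤ n := by nlinarith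
      rw [ih (n + 1 - (i + 1)).toNat (by omega) (i + 1) _ rfl (by omega),
        pvS_step n i hn hi h, if_pos hm, if_neg hs]
      ring
    · have hin : i ≤ n := by nlinarith
      rw [ih (n + 1 - (i + 1)).toNat (by omega) (i + 1) _ rfl (by omega),
        pvS_step n i hn hi h, if_neg hm]
      ring
    · rw [pvS_empty n i hi h]
      ring

-- A's full scan counts exactly the divisors in 1..n, i.e. pvS n 1
lemma pv_a_count (n : Int) (_hn : 1 ≤ n) :
    ((PySem.List.pyRange 1 (n + 1) 1).countP (fun d => decide (PySem.Int.mod n d = 0)) : Int)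
      = pvS n 1 := by
  have hnd : (PySem.List.pyRange 1 (n + 1) 1).Nodup := PySem.List.nodup_pyRange_one 1 (n + 1)
  have hset : (Finset.Icc 1 n).filter (fun d => d ∣ n ∧ 1 ≤ d ∧ 1 * d ≤ n)
      = ((PySem.List.pyRange 1 (n + 1) 1).filter (fun d => decide (PySem.Int.mod n d = 0))).toFinset := by
    ext d
    simp only [Finset.mem_filter, Finset.mem_Icc, List.mem_toFinset, List.mem_filter,
      PySem.List.mem_pyRange_one, PySem.Int.mod_eq_zero_iff_dvd, decide_eq_true_eq, one_mul]
    constructor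
    · rintro ⟨⟨h1, h2⟩, hd, -, -⟩; exact ⟨⟨h1, by omega⟩, hd⟩
    · rintro ⟨⟨h1, h2⟩, hd⟩; exact ⟨⟨h1, by omega⟩, hd, h1, by omega⟩
  unfold pvS
  rw [hset, List.toFinset_card_of_nodup (hnd.filter _), List.countP_eq_length_filter]

-- ===== VERDICT (by name: the statement is the Claim_ definition above) =====
theorem no_divisors_spec : Claim_equal_no_divisors := by
  intro n _
  unfold Spec_no_divisors no_divisors no_divisors_alt
  by_cases h1 : n = 1
  · subst h1
    rw [if_pos rfl, if_neg (by omega),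
      pvBLoop_eq 1 le_rfl ((1 + 1 - 1 : Int)).toNat 1 0 rfl le_rfl]
    have h2 : pvS 1 1 = 1 := by
      unfold pvS
      rw [Finset.Icc_self, Finset.filter_singleton, if_pos ⟨one_dvd 1, le_rfl, by omega⟩,
        Finset.card_singleton]
      rfl
    rw [h2]
    norm_num
  · rw [if_neg h1]
    by_cases hn : n < 1
    · rw [if_pos hn, PySem.List.pyRange_one_eq_nil (by omega)]
      rfl
    · have hn' : 1 ≤ n := by omega
      rw [if_neg (by omega), pvBLoop_eq n hn' ((n + 1 - 1 : Int)).toNat 1 0 rfl le_rfl,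
        PySem.List.foldl_ite_add_one (fun i => PySem.Int.mod n i = 0),
        pv_a_count n hn']
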